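-- pv_equiv track=rewrite | github.com/Myralllka/UCU_python_labs_first_semester | lab4/game/GetAndSearchNumbers.py | ulam_list_generator
-- ===== SOURCE A (Python) =====
-- def ulam_list_generator(number):
--     """
--     (int) -> list
--
--     Return the list of ulam numbers below or equal to given one
--
--     >>> ulam_list_generator(20)
--     [1, 2, 3, 4, 6, 8, 11, 13, 16, 18]
--     """
--     res = [1, 2]
--     counter = 1
--     for i in range(res[counter] + 1, number + 1):
--         addition = 0
--         for j in range(0, counter + 1):
--             for k in range(j + 1, counter + 1):
--                 if res[j] != res[k] and res[j] + res[k] == i: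
--                     addition += 1
--         if addition == 1:
--             res.append(i)
--             counter += 1
--     return res
-- ===== SOURCE B (Python) =====
-- def ulam_list_generator(number):
--     """Same Ulam list, but counting representations with one pass over the
--     list plus a set lookup instead of A's double index loop."""
--     res = [1, 2]
--     members = {1, 2}
--     for i in range(3, number + 1):
--         reps = 0
--         for u in res:
--             if u + u < i and i - u in members:
--                 reps += 1
--         if reps == 1:
--             res.append(i)
--             members.add(i)
--     return res
-- ===== Notes on version B (the rewrite author's own statement) =====
-- stated objective: faster
-- what changed: Replaces A's double index loop over all pairs (res[j],res[k]) per candidate by a single pass over res counting u with u+u<i and i-u in a hash set of the found Ulam numbers, so the inner pair scan disappears.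
import Mathlib
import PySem

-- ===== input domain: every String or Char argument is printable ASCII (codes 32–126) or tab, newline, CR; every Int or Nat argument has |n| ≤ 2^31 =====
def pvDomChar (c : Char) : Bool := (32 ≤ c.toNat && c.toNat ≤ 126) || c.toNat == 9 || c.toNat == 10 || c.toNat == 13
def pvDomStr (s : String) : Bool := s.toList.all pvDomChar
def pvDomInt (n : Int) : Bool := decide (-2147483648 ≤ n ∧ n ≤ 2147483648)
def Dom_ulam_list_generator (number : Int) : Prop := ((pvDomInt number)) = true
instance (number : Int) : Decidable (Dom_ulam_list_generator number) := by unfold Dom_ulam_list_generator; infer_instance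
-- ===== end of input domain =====

-- B replaces A's double index loop over pairs per candidate by one pass over the list
-- with a set lookup (count u with u+u<i and i-u in the set of found numbers), a faster exact algorithm.


-- ===== PORT A =====
-- body of A's 'for i in range(...)' loop: triple-nested count of index pairs, append if count == 1
def ulamStepA (st : List Int × Int) (i : Int) : List Int × Int :=
  let addition : Int :=
    (PySem.List.pyRange 0 (st.2 + 1) 1).foldl
      (fun a j =>
        (PySem.List.pyRange (j + 1) (st.2 + 1) 1).foldl
          (fun a k =>
            if PySem.List.pyGetD st.1 j 0 ≠ PySem.List.pyGetD st.1 k 0 ∧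
               PySem.List.pyGetD st.1 j 0 + PySem.List.pyGetD st.1 k 0 = i
            then a + 1 else a) a) 0
  if addition = 1 then (st.1 ++ [i], st.2 + 1) else st

def ulam_list_generator (number : Int) : List Int :=
  ((PySem.List.pyRange (PySem.List.pyGetD ([1, 2] : List Int) 1 0 + 1) (number + 1) 1).foldl
      ulamStepA ([1, 2], 1)).1

-- ===== PORT B =====
-- body of B's 'for i in range(3, number+1)' loop: one pass over res with a set lookup
def ulamStepB (st : List Int × PySem.Set Int) (i : Int) : List Int × PySem.Set Int :=
  let reps : Int :=
    st.1.foldl (fun r u => if u + u < i ∧ (i - u) ∈ st.2 then r + 1 else r) 0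
  if reps = 1 then (st.1 ++ [i], PySem.Set.add st.2 i) else st

def ulam_list_generator_alt (number : Int) : List Int :=
  ((PySem.List.pyRange 3 (number + 1) 1).foldl
      ulamStepB ([1, 2], PySem.Set.ofList [1, 2])).1

-- ===== PRECONDITION & SPEC =====
def Spec_ulam_list_generator (number : Int) (out : List Int) : Prop := out = ulam_list_generator_alt number
instance (number : Int) (out : List Int) : Decidable (Spec_ulam_list_generator number out) := by unfold Spec_ulam_list_generator; infer_instance

-- ===== CLAIM (what is proved, stated in full; the proofs are below) =====
def Claim_equal_ulam_list_generator : Prop := ∀ (number : Int), Dom_ulam_list_generator number → Spec_ulam_list_generator number (ulam_list_generator number)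

-- ===== LEMMAS AND PROOFS =====

-- structural form of A's pair count: for each u, pairs (u, v) with v after u in the list
def pairSum (i : Int) : List Int → Int
  | [] => 0
  | u :: t => (t.countP (fun v => decide (u ≠ v ∧ u + v = i)) : Int) + pairSum i t

-- A's nested index loops compute pairSum on the suffix
lemma outer_eq (i : Int) (xs : List Int) (s a : Int) (hs : 0 ≤ s) :
    (PySem.List.pyRange s (xs.length : Int) 1).foldl
      (fun a j =>
        (PySem.List.pyRange (j + 1) (xs.length : Int) 1).foldl
          (fun a k =>
            if PySem.List.pyGetD xs j 0 ≠ PySem.List.pyGetD xs k 0 ∧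
               PySem.List.pyGetD xs j 0 + PySem.List.pyGetD xs k 0 = i
            then a + 1 else a) a) a
    = a + pairSum i (xs.drop s.toNat) := by
  by_cases h : s < (xs.length : Int)
  · rw [PySem.List.pyRange_one_cons h]
    simp only [List.foldl_cons]
    rw [PySem.List.foldl_pyRange_pyGetD' xs 0
        (fun a v => if PySem.List.pyGetD xs s 0 ≠ v ∧ PySem.List.pyGetD xs s 0 + v = i then a + 1 else a)
        a (by omega)]
    rw [PySem.List.foldl_ite_add_one
        (fun v => PySem.List.pyGetD xs s 0 ≠ v ∧ PySem.List.pyGetD xs s 0 + v = i)]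
    rw [outer_eq i xs (s + 1) _ (by omega)]
    have hlt : s.toNat < xs.length := by omega
    have hdrop : xs.drop s.toNat = xs[s.toNat] :: xs.drop (s.toNat + 1) :=
      List.drop_eq_getElem_cons hlt
    have hget : PySem.List.pyGetD xs s 0 = xs[s.toNat] :=
      PySem.List.pyGetD_eq_getElem xs 0 hs h
    have hsucc : (s + 1).toNat = s.toNat + 1 := by omega
    rw [hdrop, hsucc, pairSum, hget]
    ring
  · rw [PySem.List.pyRange_one_eq_nil (by omega)]
    have : xs.length ≤ s.toNat := by omega
    rw [List.drop_eq_nil_of_le this]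
    simp [pairSum]
termination_by ((xs.length : Int) - s).toNat
decreasing_by omega

-- on a strictly increasing list, pairSum equals B's one-pass membership count
lemma pairSum_eq_memCount (i : Int) (xs : List Int) (h : xs.Pairwise (· < ·)) :
    pairSum i xs = (xs.countP (fun u => decide (u + u < i ∧ (i - u) ∈ xs)) : Int) := by
  induction xs with
  | nil => simp [pairSum]
  | cons u t ih =>
    rw [List.pairwise_cons] at h
    obtain ⟨hu, ht⟩ := h
    have hnd : t.Nodup := (ht.imp (fun hlt => ne_of_lt hlt))
    rw [pairSum, List.countP_cons, ih ht]
    have hA : t.countP (fun v => decide (u ≠ v ∧ u + v = i))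
        = if u + u < i ∧ (i - u) ∈ u :: t then 1 else 0 := by
      by_cases hm : (i - u) ∈ t
      · have hlt : u < i - u := hu _ hm
        have hcg : t.countP (fun v => decide (u ≠ v ∧ u + v = i)) = t.countP (fun v => v == i - u) := by
          apply List.countP_congr
          intro v hv
          have := hu _ hv
          simp only [decide_eq_true_eq, beq_iff_eq]
          constructor
          · rintro ⟨h1, h2⟩; omega
          · intro h1; constructor <;> omega
        have hcnt : t.countP (fun v => v == i - u) = t.count (i - u) := rfl
        rw [hcg, hcnt, List.count_eq_one_of_mem hnd hm]
        simp [hm]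
        omega
      · have h0 : t.countP (fun v => decide (u ≠ v ∧ u + v = i)) = 0 := by
          rw [List.countP_eq_zero]
          intro v hv
          simp only [decide_eq_true_eq, not_and]
          intro hne heq
          exact hm (by rw [show i - u = v by omega]; exact hv)
        rw [h0]
        rw [if_neg]
        rintro ⟨hlt, hmem⟩
        rcases List.mem_cons.mp hmem with h1 | h2
        · omega
        · exact hm h2
    have hB : t.countP (fun v => decide (v + v < i ∧ (i - v) ∈ u :: t))
        = t.countP (fun v => decide (v + v < i ∧ (i - v) ∈ t)) := by
      apply List.countP_congr
      intro v hv
      simp only [decide_eq_true_eq, List.mem_cons]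
      constructor
      · rintro ⟨h1, h2 | h3⟩
        · exact absurd h2 (by have := hu _ hv; omega)
        · exact ⟨h1, h3⟩
      · rintro ⟨h1, h2⟩; exact ⟨h1, Or.inr h2⟩
    rw [hA, hB]
    by_cases hc : u + u < i ∧ (i - u) ∈ u :: t <;> simp [hc] <;> ring

-- the two loop bodies produce equal result lists from any state satisfying the invariant
lemma ulam_loop (n lo : Int) (res : List Int)
    (h1 : res.Pairwise (· < ·)) (h2 : ∀ x ∈ res, x < lo) :
    ((PySem.List.pyRange lo n 1).foldl ulamStepA (res, (res.length : Int) - 1)).1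
    = ((PySem.List.pyRange lo n 1).foldl ulamStepB (res, res)).1 := by
  by_cases h : lo < n
  · rw [PySem.List.pyRange_one_cons h]
    simp only [List.foldl_cons]
    have hnot : lo ∉ res := fun hm => absurd (h2 _ hm) (by omega)
    have hA : ulamStepA (res, (res.length : Int) - 1) lo =
        if pairSum lo res = 1 then (res ++ [lo], (res.length : Int) - 1 + 1)
        else (res, (res.length : Int) - 1) := by
      show (if _ = 1 then _ else _) = _
      rw [show (res.length : Int) - 1 + 1 = (res.length : Int) by ring]
      rw [outer_eq lo res 0 0 (by omega)]
      simp
    have hB : ulamStepB (res, res) lo =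
        if pairSum lo res = 1 then (res ++ [lo], res ++ [lo]) else (res, res) := by
      show (if _ = 1 then _ else _) = _
      rw [PySem.List.foldl_ite_add_one (fun u => u + u < lo ∧ (lo - u) ∈ res)]
      rw [← pairSum_eq_memCount lo res h1]
      have hadd : PySem.Set.add (res : PySem.Set Int) lo = res ++ [lo] := by
        simp [PySem.Set.add, PySem.Set.contains, hnot]
      rw [hadd]
      simp
    rw [hA, hB]
    by_cases hc : pairSum lo res = 1
    · rw [if_pos hc, if_pos hc]
      have hpw : (res ++ [lo]).Pairwise (· < ·) := by
        rw [List.pairwise_append]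
        refine ⟨h1, List.pairwise_singleton _ _, ?_⟩
        intro x hx y hy
        rw [List.mem_singleton] at hy
        subst hy
        exact h2 _ hx
      have hlt : ∀ x ∈ res ++ [lo], x < lo + 1 := by
        intro x hx
        rcases List.mem_append.mp hx with h' | h'
        · exact lt_trans (h2 _ h') (by omega)
        · rw [List.mem_singleton] at h'; omega
      have hrec := ulam_loop n (lo + 1) (res ++ [lo]) hpw hlt
      rw [show (res.length : Int) - 1 + 1 = ((res ++ [lo]).length : Int) - 1 by simp]
      exact hrec
    · rw [if_neg hc, if_neg hc]
      exact ulam_loop n (lo + 1) res h1 (fun x hx => lt_trans (h2 _ hx) (by omega))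
  · rw [PySem.List.pyRange_one_eq_nil (by omega)]
    simp
termination_by (n - lo).toNat
decreasing_by all_goals omega

-- ===== VERDICT (by name: the statement is the Claim_ definition above) =====
theorem ulam_list_generator_spec : Claim_equal_ulam_list_generator := by
  intro number _
  unfold Spec_ulam_list_generator ulam_list_generator ulam_list_generator_alt
  have h := ulam_loop (number + 1) 3 [1, 2] (by decide) (by decide)
  simpa using h
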